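-- pv_equiv track=rewrite | github.com/rayonnant-ai/greedyphrase | benchmark_tinystories.py | _is_chemical
-- ===== SOURCE A (Python) =====
-- def _is_chemical(s):
--     if len(s) < 2 or not s[0].isupper():
--         return False
--     has_digit = has_upper = False
--     for c in s:
--         if c.isupper():
--             has_upper = True
--         elif c.isdigit():
--             has_digit = True
--         elif c.islower() or c in ('(', ')'):
--             pass
--         else:
--             return False
--     return has_digit and has_upper
-- ===== SOURCE B (Python) =====
-- def _is_chemical(s):
--     if len(s) < 2 or not s[0].isupper():
--         return False
--     has_upper = any(c.isupper() for c in s)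
--     has_digit = any(c.isdigit() for c in s)
--     valid = all(c.isupper() or c.isdigit() or c.islower() or c in '()' for c in s)
--     return valid and has_digit and has_upper
-- ===== Notes on version B (the rewrite author's own statement) =====
-- stated objective: simpler
-- what changed: Replaced the single flag-tracking loop with early return by three independent whole-string scans (any/any/all) combined at the end.
import Mathlib
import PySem

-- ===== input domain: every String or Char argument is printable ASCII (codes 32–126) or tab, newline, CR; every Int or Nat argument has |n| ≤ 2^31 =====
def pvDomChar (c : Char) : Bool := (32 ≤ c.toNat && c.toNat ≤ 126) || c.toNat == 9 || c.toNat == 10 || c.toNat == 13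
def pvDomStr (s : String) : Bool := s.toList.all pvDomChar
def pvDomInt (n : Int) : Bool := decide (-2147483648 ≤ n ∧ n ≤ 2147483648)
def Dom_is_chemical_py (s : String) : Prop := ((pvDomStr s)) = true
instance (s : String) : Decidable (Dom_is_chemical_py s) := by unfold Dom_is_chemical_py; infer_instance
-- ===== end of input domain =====

-- B replaces A's single flag-tracking early-return loop with three independent scans (any upper / any digit / all chars valid) combined at the end: a simpler decomposition, same cost.


-- ===== PORT A =====
-- the for-loop over s with flags has_digit, has_upper and an early 'return False'
def isChemLoop : List Char → Bool → Bool → Bool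
  | [], hd, hu => hd && hu
  | c :: rest, hd, hu =>
    if PySem.Chars.isupper c then isChemLoop rest hd true
    else if PySem.Chars.isdigit c then isChemLoop rest true hu
    else if PySem.Chars.islower c || c = '(' || c = ')' then isChemLoop rest hd hu
    else false

def is_chemical_py (s : String) : Bool :=
  let cs := s.toList
  if cs.length < 2 then false
  else match cs with
    | [] => false
    | c0 :: _ => if !(PySem.Chars.isupper c0) then false else isChemLoop cs false false

-- ===== PORT B =====
def isChemValidChar (c : Char) : Bool :=
  PySem.Chars.isupper c || PySem.Chars.isdigit c || PySem.Chars.islower c || c = '(' || c = ')'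

def is_chemical_py_alt (s : String) : Bool :=
  let cs := s.toList
  if cs.length < 2 then false
  else match cs with
    | [] => false
    | c0 :: _ =>
      if !(PySem.Chars.isupper c0) then false
      else
        let has_upper := cs.any PySem.Chars.isupper
        let has_digit := cs.any PySem.Chars.isdigit
        let valid := cs.all isChemValidChar
        valid && has_digit && has_upper

-- ===== PRECONDITION & SPEC =====
def Spec_is_chemical_py (s : String) (out : Bool) : Prop := out = is_chemical_py_alt s
instance (s : String) (out : Bool) : Decidable (Spec_is_chemical_py s out) := by unfold Spec_is_chemical_py; infer_instance

-- ===== CLAIM (what is proved, stated in full; the proofs are below) =====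
def Claim_equal_is_chemical_py : Prop := ∀ (s : String), Dom_is_chemical_py s → Spec_is_chemical_py s (is_chemical_py s)

-- ===== LEMMAS AND PROOFS =====
theorem isupper_not_isdigit {c : Char} (h : PySem.Chars.isupper c = true) :
    PySem.Chars.isdigit c = false := by
  simp [PySem.Chars.isupper, Char.le_def, UInt32.le_iff_toNat_le] at h
  simp [PySem.Chars.isdigit, Char.le_def, UInt32.le_iff_toNat_le]
  omega

theorem isChemLoop_eq (cs : List Char) (hd hu : Bool) :
    isChemLoop cs hd hu =
      (cs.all isChemValidChar && (hd || cs.any PySem.Chars.isdigit)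
        && (hu || cs.any PySem.Chars.isupper)) := by
  induction cs generalizing hd hu with
  | nil => simp [isChemLoop]
  | cons c rest ih =>
    by_cases hU : PySem.Chars.isupper c = true
    · simp [isChemLoop, hU, ih, isChemValidChar, isupper_not_isdigit hU]
    · by_cases hD : PySem.Chars.isdigit c = true
      · simp [isChemLoop, hU, hD, ih, isChemValidChar]
      · by_cases hL : (PySem.Chars.islower c || c = '(' || c = ')') = true
        · simp [isChemLoop, hU, hD, hL, ih, isChemValidChar]
        · simp only [Bool.not_eq_true] at hU hD
          simp [isChemLoop, hU, hD, hL, isChemValidChar]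

-- ===== VERDICT (by name: the statement is the Claim_ definition above) =====
theorem is_chemical_py_spec : Claim_equal_is_chemical_py := by
  intro s _
  unfold Spec_is_chemical_py is_chemical_py is_chemical_py_alt
  cases h : s.toList with
  | nil => simp
  | cons c0 rest =>
    simp only
    split_ifs with h1 h2
    · rfl
    · rfl
    · simp only [Bool.not_eq_true', Bool.not_eq_false] at h2
      rw [isChemLoop_eq]
      simp [isChemValidChar, h2, isupper_not_isdigit h2]
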